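-- pv_equiv track=rewrite | github.com/Xiwei-1D20/Data-Structure-and-Algorithm-B | 第一周作业/月度开销.py | minicost
-- ===== SOURCE A (Python) =====
-- def minicost(day, month, cost_list) :
--     left = max(cost_list)  #使用二分查找获得合适的最大的cost
--     right = sum(cost_list)
--     while left <= right:
--         mid = (right + left)//2
--         month_needed = 1
--         cost_per_month = 0
--         for j in range(day):
--             if cost_per_month + cost_list[j] <= mid:
--                 cost_per_month += cost_list[j]
--             else:
--                 cost_per_month = cost_list[j]
--                 month_needed += 1
--         if month_needed <= month:
--             right = mid - 1
--         elif month_needed > month: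
--             left = mid + 1
--     return left
-- ===== SOURCE B (Python) =====
-- def minicost(day, month, cost_list):
--     lo = max(cost_list)
--     hi = sum(cost_list)
--     prefix = [cost_list[j] for j in range(day)]
--
--     def months_for(cap):
--         # count maximal groups: each month takes one day, then extends while the sum stays within cap
--         groups = 0
--         i = 0
--         n = len(prefix)
--         while i < n:
--             groups += 1
--             total = prefix[i]
--             i += 1
--             while i < n and total + prefix[i] <= cap:
--                 total += prefix[i]
--                 i += 1
--         return max(1, groups)
--
--     def solve(lo, hi):
--         if lo > hi:
--             return lo
--         mid = (lo + hi) // 2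
--         if months_for(mid) <= month:
--             return solve(lo, mid - 1)
--         return solve(mid + 1, hi)
--
--     return solve(lo, hi)
-- ===== Notes on version B (the rewrite author's own statement) =====
-- stated objective: alternative
-- what changed: B replaces A's imperative while-loop binary search and index-driven reset-accumulator month count by a recursive bisection over an explicitly built day-prefix list whose month counter scans maximal within-budget groups with a nested loop.
-- outside the precondition, e.g. on minicost(8, 2, [3, -1]): A returns 3, B raises IndexError
import Mathlib
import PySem

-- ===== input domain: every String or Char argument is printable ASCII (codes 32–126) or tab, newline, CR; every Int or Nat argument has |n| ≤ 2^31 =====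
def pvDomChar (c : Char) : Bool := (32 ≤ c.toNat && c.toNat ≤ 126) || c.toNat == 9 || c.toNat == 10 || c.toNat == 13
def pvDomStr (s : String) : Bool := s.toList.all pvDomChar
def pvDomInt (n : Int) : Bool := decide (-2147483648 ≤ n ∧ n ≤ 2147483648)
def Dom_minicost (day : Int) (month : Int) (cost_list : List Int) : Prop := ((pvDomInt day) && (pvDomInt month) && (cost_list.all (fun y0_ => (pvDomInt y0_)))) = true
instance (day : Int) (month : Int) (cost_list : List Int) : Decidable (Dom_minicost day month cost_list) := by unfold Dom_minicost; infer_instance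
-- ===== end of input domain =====

-- B restructures A: recursive bisection over an explicitly built day-prefix list, with the month
-- count obtained by scanning maximal within-budget groups instead of A's reset-accumulator.

-- ===== PORT A =====
-- A's inner for-loop body over state (month_needed, cost_per_month)
def pvStepA (mid : Int) (st : Int × Int) (c : Int) : Int × Int :=
  if st.2 + c ≤ mid then (st.1, st.2 + c) else (st.1 + 1, c)

-- the for j in range(day) loop; pyGetD's default is unreachable under Pre_ (0 ≤ j < day ≤ len)
def pvNeededA (day : Int) (mid : Int) (cost_list : List Int) : Int :=
  ((PySem.List.pyRange 0 day 1).foldl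
    (fun st j => pvStepA mid st (PySem.List.pyGetD cost_list j 0)) (1, 0)).1

-- A's while loop; the Python 'elif month_needed > month' is the exact negation of the if-test
def pvLoopA (day : Int) (month : Int) (cost_list : List Int) (left right : Int) : Int :=
  if _h : left ≤ right then
    let mid := PySem.Int.floordiv (right + left) 2
    if pvNeededA day mid cost_list ≤ month then
      pvLoopA day month cost_list left (mid - 1)
    else
      pvLoopA day month cost_list (mid + 1) right
  else left
termination_by (right - left + 1).toNat
decreasing_by
  · have := PySem.Int.floordiv_two_mid_bounds (lo := left) (hi := right) _h
    rw [Int.add_comm] at this; omega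
  · have := PySem.Int.floordiv_two_mid_bounds (lo := left) (hi := right) _h
    rw [Int.add_comm] at this; omega

def minicost (day : Int) (month : Int) (cost_list : List Int) : Int :=
  let left := (PySem.List.max? cost_list (fun x => x)).getD 0   -- max(cost_list); empty list excluded by Pre_
  let right := cost_list.sum
  pvLoopA day month cost_list left right

-- ===== PORT B =====
-- inner while of months_for: extend the current month while the total stays within cap
def pvChomp (cap : Int) (total : Int) : List Int → List Int
  | [] => []
  | c :: t => if total + c ≤ cap then pvChomp cap (total + c) t else c :: t

theorem pvChomp_length_le (cap total : Int) (l : List Int) :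
    (pvChomp cap total l).length ≤ l.length := by
  induction l generalizing total with
  | nil => simp [pvChomp]
  | cons c t ih =>
    simp only [pvChomp]
    split
    · exact Nat.le_trans (ih _) (Nat.le_succ _)
    · exact Nat.le_refl _

-- outer while of months_for: each month takes one day then extends greedily
def pvGroups (cap : Int) : List Int → Int
  | [] => 0
  | c :: t => 1 + pvGroups cap (pvChomp cap c t)
termination_by l => l.length
decreasing_by
  exact Nat.lt_succ_of_le (pvChomp_length_le _ _ _)

def pvMonthsFor (cap : Int) (pref : List Int) : Int :=
  max 1 (pvGroups cap pref)

def pvSolveB (month : Int) (pref : List Int) (lo hi : Int) : Int :=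
  if _h : lo > hi then lo
  else
    let mid := PySem.Int.floordiv (lo + hi) 2
    if pvMonthsFor mid pref ≤ month then
      pvSolveB month pref lo (mid - 1)
    else
      pvSolveB month pref (mid + 1) hi
termination_by (hi - lo + 1).toNat
decreasing_by
  · have := PySem.Int.floordiv_two_mid_bounds (lo := lo) (hi := hi) (by omega)
    omega
  · have := PySem.Int.floordiv_two_mid_bounds (lo := lo) (hi := hi) (by omega)
    omega

def minicost_alt (day : Int) (month : Int) (cost_list : List Int) : Int :=
  let lo := (PySem.List.max? cost_list (fun x => x)).getD 0
  let hi := cost_list.sum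
  -- [cost_list[j] for j in range(day)]; pyGetD's default unreachable under Pre_
  let pref := (PySem.List.pyRange 0 day 1).map (fun j => PySem.List.pyGetD cost_list j 0)
  pvSolveB month pref lo hi

-- ===== PRECONDITION & SPEC =====
-- Pre_ excludes empty cost_list (A's max raises ValueError) and day > len(cost_list), where A raises
-- IndexError except in the accidental corner max(cost_list) > sum(cost_list), where its binary-search
-- loop never runs and A returns max; B builds the day-prefix eagerly and raises IndexError there.
def Pre_minicost (day : Int) (month : Int) (cost_list : List Int) : Prop :=
  cost_list ≠ [] ∧ day ≤ (cost_list.length : Int)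
instance (day : Int) (month : Int) (cost_list : List Int) : Decidable (Pre_minicost day month cost_list) := by
  unfold Pre_minicost; infer_instance

def pvWitness_minicost : Int × Int × List Int := (2, 2, [3, 1])

def Spec_minicost (day : Int) (month : Int) (cost_list : List Int) (out : Int) : Prop :=
  out = minicost_alt day month cost_list
instance (day : Int) (month : Int) (cost_list : List Int) (out : Int) : Decidable (Spec_minicost day month cost_list out) := by
  unfold Spec_minicost; infer_instance

-- ===== CLAIM (what is proved, stated in full; the proofs are below) =====
def Claim_equal_minicost : Prop := ∀ (day : Int) (month : Int) (cost_list : List Int), Dom_minicost day month cost_list → Pre_minicost day month cost_list → Spec_minicost day month cost_list (minicost day month cost_list)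

-- ===== LEMMAS AND PROOFS =====

-- proof-side view of A's accumulator: number of resets performed
def pvResets (cap : Int) (acc : Int) : List Int → Int
  | [] => 0
  | c :: t => if acc + c ≤ cap then pvResets cap (acc + c) t else 1 + pvResets cap c t

theorem foldA_fst (cap : Int) (l : List Int) :
    ∀ (m acc : Int), (l.foldl (pvStepA cap) (m, acc)).1 = m + pvResets cap acc l := by
  induction l with
  | nil => intro m acc; simp [pvResets]
  | cons c t ih =>
    intro m acc
    simp only [List.foldl, pvStepA, pvResets]
    by_cases h : acc + c ≤ cap
    · simp [h, ih]
    · simp [h, ih]; ring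

theorem resets_eq_groups_chomp (cap : Int) (l : List Int) :
    ∀ acc, pvResets cap acc l = pvGroups cap (pvChomp cap acc l) := by
  induction l with
  | nil => intro acc; simp [pvResets, pvChomp, pvGroups]
  | cons c t ih =>
    intro acc
    simp only [pvResets, pvChomp]
    by_cases h : acc + c ≤ cap
    · simp [h, ih]
    · simp [h, pvGroups, ih c]

theorem pvGroups_nonneg (cap : Int) (l : List Int) : 0 ≤ pvGroups cap l := by
  induction l using pvGroups.induct cap with
  | case1 => simp [pvGroups]
  | case2 c t ih => rw [pvGroups]; omega

-- the two month counters agree whenever every scheduled cost is ≤ cap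
theorem needed_eq (cap : Int) (pref : List Int) (h : ∀ c ∈ pref, c ≤ cap) :
    1 + pvResets cap 0 pref = pvMonthsFor cap pref := by
  cases pref with
  | nil => simp [pvResets, pvMonthsFor, pvGroups]
  | cons c t =>
    have hc : (0 : Int) + c ≤ cap := by
      have := h c (List.mem_cons_self)
      omega
    have hg := pvGroups_nonneg cap (pvChomp cap c t)
    rw [pvResets, if_pos hc, zero_add, resets_eq_groups_chomp, pvMonthsFor, pvGroups]
    omega

-- B's built prefix is the first day elements of cost_list (under Pre_)
theorem pref_eq_take (day : Int) (cost_list : List Int)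
    (h0 : 0 ≤ day) (hday : day ≤ (cost_list.length : Int)) :
    (PySem.List.pyRange 0 day 1).map (fun j => PySem.List.pyGetD cost_list j 0)
      = cost_list.take day.toNat := by
  have hsplit : PySem.List.pyRange 0 (cost_list.length : Int) 1
      = PySem.List.pyRange 0 day 1 ++ PySem.List.pyRange day (cost_list.length : Int) 1 :=
    PySem.List.pyRange_one_append 0 day _ h0 hday
  have hfull := PySem.List.map_pyGetD_pyRange_zero' cost_list 0
  rw [hsplit, List.map_append] at hfull
  have hlen : ((PySem.List.pyRange 0 day 1).map
      (fun j => PySem.List.pyGetD cost_list j 0)).length = day.toNat := by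
    simp [PySem.List.length_pyRange_one]
  calc (PySem.List.pyRange 0 day 1).map (fun j => PySem.List.pyGetD cost_list j 0)
      = (((PySem.List.pyRange 0 day 1).map (fun j => PySem.List.pyGetD cost_list j 0)
          ++ (PySem.List.pyRange day (cost_list.length : Int) 1).map
              (fun j => PySem.List.pyGetD cost_list j 0)).take day.toNat) := by
        rw [List.take_left' hlen]
    _ = cost_list.take day.toNat := by rw [hfull]

-- A's indexed month count equals B's count over the built prefix
theorem neededA_eq (day mid : Int) (cost_list : List Int)
    (hday : day ≤ (cost_list.length : Int))
    (hmax : ∀ c ∈ cost_list, c ≤ mid) :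
    pvNeededA day mid cost_list
      = pvMonthsFor mid ((PySem.List.pyRange 0 day 1).map
          (fun j => PySem.List.pyGetD cost_list j 0)) := by
  by_cases hd : day ≤ 0
  · have h1 : PySem.List.pyRange 0 day 1 = [] := PySem.List.pyRange_one_eq_nil (by omega)
    rw [pvNeededA, h1]
    simp [pvMonthsFor, pvGroups]
  · have hd' : 0 < day := by omega
    set pref := (PySem.List.pyRange 0 day 1).map (fun j => PySem.List.pyGetD cost_list j 0)
      with hpref
    have hprefeq : pref = cost_list.take day.toNat :=
      pref_eq_take day cost_list (by omega) hday
    have hlen : pref.length = day.toNat := by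
      rw [hprefeq, List.length_take]
      omega
    -- replace indexing into cost_list by indexing into the prefix
    have hcongr : (PySem.List.pyRange 0 day 1).foldl
        (fun st j => pvStepA mid st (PySem.List.pyGetD cost_list j 0)) (1, 0)
      = (PySem.List.pyRange 0 day 1).foldl
        (fun st j => pvStepA mid st (PySem.List.pyGetD pref j 0)) (1, 0) := by
      apply PySem.List.foldl_congr_mem
      intro st j hj
      have hj' := (PySem.List.mem_pyRange_one).mp hj
      have h0j : 0 ≤ j := hj'.1
      have hjd : j < day := hj'.2
      have hjlen : j < (cost_list.length : Int) := lt_of_lt_of_le hjd hday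
      rw [PySem.List.pyGetD_eq_getElem cost_list 0 h0j hjlen,
          PySem.List.pyGetD_eq_getElem pref 0 h0j (by rw [hlen]; omega)]
      simp only [hprefeq, List.getElem_take]
    have hlenpref : PySem.List.len pref = day := by
      simp [PySem.List.len, hlen]
      omega
    have hrange : PySem.List.pyRange 0 day 1 = PySem.List.pyRange 0 (PySem.List.len pref) 1 := by
      rw [hlenpref]
    rw [pvNeededA, hcongr, hrange,
        PySem.List.foldl_pyRange_pyGetD pref 0 (fun st c => pvStepA mid st c) ((1:Int),(0:Int))
          (show (0:Int) ≤ 0 from le_refl 0)]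
    simp only [Int.toNat_zero, List.drop_zero]
    rw [foldA_fst]
    apply needed_eq
    intro c hc
    apply hmax
    rw [hprefeq] at hc
    exact List.mem_of_mem_take hc

theorem loop_eq (day month : Int) (cost_list : List Int)
    (hday : day ≤ (cost_list.length : Int)) :
    ∀ (l r : Int), (∀ c ∈ cost_list, c ≤ l) →
      pvLoopA day month cost_list l r
        = pvSolveB month ((PySem.List.pyRange 0 day 1).map
            (fun j => PySem.List.pyGetD cost_list j 0)) l r := by
  intro l r
  induction l, r using pvLoopA.induct day month cost_list with
  | case1 l r hlr mid hle ih =>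
    intro hl
    have hb := PySem.Int.floordiv_two_mid_bounds (lo := l) (hi := r) hlr
    have h2 : PySem.Int.floordiv (l + r) 2 = mid := by rw [Int.add_comm]
    have h2' : PySem.Int.floordiv (r + l) 2 = mid := rfl
    have hmax : ∀ c ∈ cost_list, c ≤ mid := by
      intro c hc
      have h1 := hl c hc
      omega
    rw [neededA_eq day mid cost_list hday hmax] at hle
    rw [pvLoopA, pvSolveB, dif_pos hlr, dif_neg (by omega)]
    dsimp only
    rw [h2', h2, neededA_eq day mid cost_list hday hmax, if_pos hle, if_pos hle]
    exact ih hl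
  | case2 l r hlr mid hgt ih =>
    intro hl
    have hb := PySem.Int.floordiv_two_mid_bounds (lo := l) (hi := r) hlr
    have h2 : PySem.Int.floordiv (l + r) 2 = mid := by rw [Int.add_comm]
    have h2' : PySem.Int.floordiv (r + l) 2 = mid := rfl
    have hmax : ∀ c ∈ cost_list, c ≤ mid := by
      intro c hc
      have h1 := hl c hc
      omega
    rw [neededA_eq day mid cost_list hday hmax] at hgt
    rw [pvLoopA, pvSolveB, dif_pos hlr, dif_neg (by omega)]
    dsimp only
    rw [h2', h2, neededA_eq day mid cost_list hday hmax, if_neg hgt, if_neg hgt]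
    apply ih
    intro c hc
    have h1 := hl c hc
    omega
  | case3 l r hlr =>
    intro _
    rw [pvLoopA, pvSolveB, dif_neg hlr, dif_pos (by omega)]

-- ===== VERDICT (by name: the statement is the Claim_ definition above) =====
theorem minicost_spec : Claim_equal_minicost := by
  intro day month cost_list _hdom hpre
  obtain ⟨hne, hday⟩ := hpre
  unfold Spec_minicost minicost minicost_alt
  apply loop_eq day month cost_list hday
  intro c hc
  obtain ⟨x, t, hx⟩ := List.exists_cons_of_ne_nil hne
  subst hx
  rw [PySem.List.max?_id_cons, Option.getD_some]
  rcases List.mem_cons.mp hc with h | h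
  · exact h ▸ (PySem.List.le_foldl_max t x).1
  · exact (PySem.List.le_foldl_max t x).2 c h
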